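-- pv_equiv track=rewrite | github.com/nayanika2304/BioInformatics | bioinformatics_1/week_1/frequent_words.py | frequent_kmers
-- ===== SOURCE A (Python) =====
-- def frequency_map(text, k):
--     freq = {}
--
--     n = len(text)
--
--     for i in range(n - k + 1):
--
--         pattern = text[i:i + k]
--
--         if pattern in freq:
--
--             freq[pattern] += 1
--
--         else:
--
--             freq[pattern] = 1
--
--     return freq
--
-- def frequent_kmers(text, k):
--     kmers = []
--
--     freq = frequency_map(text, k)
--
--     m = max(freq.values())
--
--     for most_frequent_kmer in freq:
--
--         if freq[most_frequent_kmer] == m: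
--             kmers.append(most_frequent_kmer)
--
--     return kmers
-- ===== SOURCE B (Python) =====
-- def frequent_kmers(text, k):
--     pats = [text[i:i + k] for i in range(len(text) - k + 1)]
--     best = 0
--     winners = set()
--     run = 0
--     prev = None
--     for p in sorted(pats):
--         run = run + 1 if p == prev else 1
--         if run > best:
--             best = run
--             winners = {p}
--         elif run == best:
--             winners.add(p)
--         prev = p
--     out = []
--     for q in pats:
--         if q in winners:
--             out.append(q)
--             winners.discard(q)
--     return out
-- ===== Notes on version B (the rewrite author's own statement) =====
-- stated objective: alternative
-- what changed: B replaces A's hash-map counting plus max-and-filter scan by a sort-based algorithm: it sorts the list of k-mers, finds the maximal run length and the set of k-mers attaining it in one scan over the sorted list, then emits the winners at their first occurrence in the text.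
import Mathlib
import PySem

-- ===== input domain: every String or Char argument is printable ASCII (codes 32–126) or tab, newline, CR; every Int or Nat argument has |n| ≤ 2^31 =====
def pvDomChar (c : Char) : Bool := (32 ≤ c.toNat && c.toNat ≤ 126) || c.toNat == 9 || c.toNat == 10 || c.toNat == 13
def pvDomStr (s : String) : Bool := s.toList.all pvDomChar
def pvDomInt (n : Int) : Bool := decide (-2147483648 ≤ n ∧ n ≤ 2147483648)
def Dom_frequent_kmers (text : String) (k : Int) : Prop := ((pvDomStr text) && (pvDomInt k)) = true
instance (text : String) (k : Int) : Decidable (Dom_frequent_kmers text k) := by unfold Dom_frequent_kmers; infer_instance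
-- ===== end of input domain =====

-- B replaces A's hash-map counting and max-then-filter scan by a sort-based algorithm:
-- sort the k-mers, scan runs for the maximal multiplicity and its winner set, then emit
-- winners at their first occurrence; return values only, no mutation.

-- ===== PORT A =====
def frequency_map (text : String) (k : Int) : PySem.Dict String Int :=
  (PySem.List.pyRange 0 ((text.toList.length : Int) - k + 1) 1).foldl
    (fun freq i =>
      let pattern := PySem.Str.slice text (some i) (some (i + k))
      if freq.contains pattern then freq.modify pattern 0 (· + 1)
      else freq.insert pattern 1)
    PySem.Dict.empty

def frequent_kmers (text : String) (k : Int) : List String :=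
  let freq := frequency_map text k
  match PySem.List.max? freq.values (fun v => v) with
  | none => []  -- Python's max raises ValueError here; excluded by Pre_
  | some m =>
    freq.keys.foldl
      (fun kmers kmer => if freq.getD kmer 0 == m then kmers ++ [kmer] else kmers) []

-- ===== PORT B =====
-- Python's ascending string comparison for sorted()
def pvLe (a b : String) : Bool := decide (a ≤ b)

-- state of the run scan: (best, winners, run, prev)
def pvScanStep (st : Int × PySem.Set String × Int × Option String) (p : String) :
    Int × PySem.Set String × Int × Option String :=
  let run : Int := if some p == st.2.2.2 then st.2.2.1 + 1 else 1
  if run > st.1 then (run, PySem.Set.ofList [p], run, some p)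
  else if run == st.1 then (st.1, PySem.Set.add st.2.1 p, run, some p)
  else (st.1, st.2.1, run, some p)

def pvEmitStep (ow : List String × PySem.Set String) (q : String) :
    List String × PySem.Set String :=
  if PySem.Set.contains ow.2 q then (ow.1 ++ [q], PySem.Set.discard ow.2 q) else ow

def frequent_kmers_alt (text : String) (k : Int) : List String :=
  let pats := (PySem.List.pyRange 0 ((text.toList.length : Int) - k + 1) 1).map
    (fun i => PySem.Str.slice text (some i) (some (i + k)))
  -- Python's sorted(pats): ascending sort of strings; its value is the unique ascending
  -- rearrangement, computed here with the library's mergeSort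
  let st := (pats.mergeSort pvLe).foldl pvScanStep
    ((0 : Int), (PySem.Set.empty : PySem.Set String), (0 : Int), (none : Option String))
  (pats.foldl pvEmitStep (([] : List String), st.2.1)).1

-- ===== PRECONDITION & SPEC =====
-- A raises ValueError (max of an empty sequence) exactly when k > len(text); Pre_ excludes those inputs.
def Pre_frequent_kmers (text : String) (k : Int) : Prop := k ≤ (text.toList.length : Int)
instance (text : String) (k : Int) : Decidable (Pre_frequent_kmers text k) := by unfold Pre_frequent_kmers; infer_instance
def pvWitness_frequent_kmers : String × Int := ("ACGTACGT", 2)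

def Spec_frequent_kmers (text : String) (k : Int) (out : List String) : Prop := out = frequent_kmers_alt text k
instance (text : String) (k : Int) (out : List String) : Decidable (Spec_frequent_kmers text k out) := by unfold Spec_frequent_kmers; infer_instance

-- ===== CLAIM (what is proved, stated in full; the proofs are below) =====
def Claim_equal_frequent_kmers : Prop := ∀ (text : String) (k : Int), Dom_frequent_kmers text k → Pre_frequent_kmers text k → Spec_frequent_kmers text k (frequent_kmers text k)

-- ===== LEMMAS AND PROOFS =====
def pvPats (text : String) (k : Int) : List String :=
  (PySem.List.pyRange 0 ((text.toList.length : Int) - k + 1) 1).map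
    (fun i => PySem.Str.slice text (some i) (some (i + k)))

-- invariant of the run scan after processing the sorted prefix s
def pvInv (s : List String) (st : Int × PySem.Set String × Int × Option String) : Prop :=
  (s = [] ∧ st = (0, PySem.Set.empty, 0, none)) ∨
  (∃ last, st.2.2.2 = some last ∧ last ∈ s ∧ (∀ x ∈ s, x ≤ last) ∧
    st.2.2.1 = (s.count last : Int) ∧
    (∀ x ∈ s, (s.count x : Int) ≤ st.1) ∧ (∃ x ∈ s, (s.count x : Int) = st.1) ∧
    (∀ p, p ∈ st.2.1 ↔ (p ∈ s ∧ (s.count p : Int) = st.1)))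

lemma pvInv_step (s : List String) (st : Int × PySem.Set String × Int × Option String)
    (p : String) (hinv : pvInv s st) (hle : ∀ x ∈ s, x ≤ p) :
    pvInv (s ++ [p]) (pvScanStep st p) := by
  obtain ⟨b, w, r, prev⟩ := st
  have hcl : ∀ x, ((s ++ [p]).count x : Int)
      = (s.count x : Int) + (if p = x then 1 else 0) := by
    intro x
    rw [List.count_append]
    by_cases hx : p = x
    · subst hx; simp
    · simp [hx]
  cases hinv with
  | inl h =>
    obtain ⟨hs, hst⟩ := h
    subst hs
    injection hst with h1 h2; injection h2 with h2 h3; injection h3 with h3 h4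
    subst h1; subst h2; subst h3; subst h4
    have hstep : pvScanStep ((0 : Int), (PySem.Set.empty : PySem.Set String), (0 : Int),
        (none : Option String)) p = (1, PySem.Set.ofList [p], 1, some p) := by
      rw [pvScanStep]
      norm_num
    rw [hstep]
    refine Or.inr ⟨p, rfl, by simp, ?_, by simp, ?_, ⟨p, by simp⟩, ?_⟩
    · intro x hx
      simp at hx
      exact le_of_eq hx
    · intro x hx
      simp at hx
      simp [hx]
    · intro q
      rw [PySem.Set.mem_ofList]
      simp only [List.mem_singleton]
      constructor
      · intro hq; subst hq; simp
      · rintro ⟨hq, _⟩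
        simpa using hq
  | inr h =>
    obtain ⟨last, hprev, hlast, hub, hrun, hbub, hbex, hwin⟩ := h
    simp only [] at hprev hrun hbub hbex hwin
    subst hprev
    have hslast : (s.count last : Int) ≤ b := hbub last hlast
    have hble : ∀ x ∈ s, x ≤ p := hle
    by_cases hpl : p = last
    · -- run continues
      subst hpl
      have hbeq : (some p == some p) = true := by simp
      rw [pvScanStep]
      simp only [hbeq, if_true]
      have hclp : ((s ++ [p]).count p : Int) = r + 1 := by
        rw [hcl]; simp [hrun]
      have hclx : ∀ x, x ≠ p → ((s ++ [p]).count x : Int) = (s.count x : Int) := by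
        intro x hx; rw [hcl]; simp [Ne.symm hx]
      by_cases hgt : r + 1 > b
      · rw [if_pos hgt]
        refine Or.inr ⟨p, rfl, by simp, ?_, by simpa using hclp.symm, ?_, ⟨p, by simp, hclp⟩, ?_⟩
        · intro x hx
          rcases List.mem_append.mp hx with hx | hx
          · exact hle x hx
          · simp at hx; rw [hx]
        · intro x hx
          by_cases hxp : x = p
          · subst hxp; rw [hclp]
          · rcases List.mem_append.mp hx with hx | hx
            · rw [hclx x hxp]
              have := hbub x hx
              omega
            · simp at hx; exact absurd hx hxp
        · intro q
          rw [PySem.Set.mem_ofList]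
          simp only [List.mem_singleton]
          constructor
          · intro hq; subst hq; exact ⟨by simp, hclp⟩
          · rintro ⟨hq1, hq2⟩
            by_cases hqp : q = p
            · exact hqp
            · rcases List.mem_append.mp hq1 with hq1 | hq1
              · rw [hclx q hqp] at hq2
                have := hbub q hq1
                omega
              · simp at hq1; exact absurd hq1 hqp
      · rw [if_neg hgt]
        by_cases heq : r + 1 = b
        · rw [if_pos (by simp [heq] : ((r + 1 : Int) == b) = true)]
          refine Or.inr ⟨p, rfl, by simp, ?_, by rw [hclp, heq], ?_, ⟨p, by simp, by rw [hclp, heq]⟩, ?_⟩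
          · intro x hx
            rcases List.mem_append.mp hx with hx | hx
            · exact hle x hx
            · simp at hx; rw [hx]
          · intro x hx
            by_cases hxp : x = p
            · subst hxp; rw [hclp]; omega
            · rcases List.mem_append.mp hx with hx | hx
              · rw [hclx x hxp]; exact hbub x hx
              · simp at hx; exact absurd hx hxp
          · intro q
            rw [PySem.Set.mem_add]
            constructor
            · rintro (hq | hq)
              · obtain ⟨hq1, hq2⟩ := (hwin q).mp hq
                by_cases hqp : q = p
                · subst hqp; exact ⟨by simp, by rw [hclp, heq]⟩
                · exact ⟨List.mem_append.mpr (Or.inl hq1), by rw [hclx q hqp]; exact hq2⟩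
              · subst hq; exact ⟨by simp, by rw [hclp, heq]⟩
            · rintro ⟨hq1, hq2⟩
              by_cases hqp : q = p
              · exact Or.inr hqp
              · rcases List.mem_append.mp hq1 with hq1 | hq1
                · rw [hclx q hqp] at hq2
                  exact Or.inl ((hwin q).mpr ⟨hq1, hq2⟩)
                · simp at hq1; exact absurd hq1 hqp
        · rw [if_neg (by simp [heq] : ¬ (((r + 1 : Int) == b) = true))]
          have hlt : r + 1 < b := by omega
          refine Or.inr ⟨p, rfl, by simp, ?_, by simpa using hclp.symm, ?_, ?_, ?_⟩
          · intro x hx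
            rcases List.mem_append.mp hx with hx | hx
            · exact hle x hx
            · simp at hx; rw [hx]
          · intro x hx
            by_cases hxp : x = p
            · subst hxp; rw [hclp]; omega
            · rcases List.mem_append.mp hx with hx | hx
              · rw [hclx x hxp]; exact hbub x hx
              · simp at hx; exact absurd hx hxp
          · obtain ⟨x, hx, hxb⟩ := hbex
            have hxp : x ≠ p := by
              intro hxe; subst hxe
              omega
            exact ⟨x, List.mem_append.mpr (Or.inl hx), by rw [hclx x hxp]; exact hxb⟩
          · intro q
            rw [hwin q]
            constructor
            · rintro ⟨hq1, hq2⟩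
              have hqp : q ≠ p := by
                intro hqe; subst hqe
                omega
              exact ⟨List.mem_append.mpr (Or.inl hq1), by rw [hclx q hqp]; exact hq2⟩
            · rintro ⟨hq1, hq2⟩
              by_cases hqp : q = p
              · subst hqp
                rw [hclp] at hq2
                omega
              · rcases List.mem_append.mp hq1 with hq1 | hq1
                · rw [hclx q hqp] at hq2
                  exact ⟨hq1, hq2⟩
                · simp at hq1; exact absurd hq1 hqp
    · -- new run of a fresh element
      have hps : p ∉ s := fun hp => hpl (le_antisymm (hub p hp) (hle last hlast))
      have hbeq : (some p == some last) = false := by simp [hpl]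
      rw [pvScanStep]
      simp only [hbeq, Bool.false_eq_true, if_false]
      have hclp : ((s ++ [p]).count p : Int) = 1 := by
        rw [hcl]
        have : s.count p = 0 := List.count_eq_zero.mpr hps
        simp [this]
      have hclx : ∀ x, x ≠ p → ((s ++ [p]).count x : Int) = (s.count x : Int) := by
        intro x hx; rw [hcl]; simp [Ne.symm hx]
      have hb1 : (1 : Int) ≤ b := by
        have : 0 < s.count last := List.count_pos_iff.mpr hlast
        omega
      have hgt : ¬ ((1 : Int) > b) := by omega
      rw [if_neg hgt]
      by_cases heq : (1 : Int) = b
      · rw [if_pos (by simp [heq] : (((1 : Int)) == b) = true)]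
        refine Or.inr ⟨p, rfl, by simp, ?_, by rw [hclp, heq], ?_, ⟨p, by simp, by rw [hclp, heq]⟩, ?_⟩
        · intro x hx
          rcases List.mem_append.mp hx with hx | hx
          · exact hle x hx
          · simp at hx; rw [hx]
        · intro x hx
          by_cases hxp : x = p
          · subst hxp; rw [hclp]; omega
          · rcases List.mem_append.mp hx with hx | hx
            · rw [hclx x hxp]; exact hbub x hx
            · simp at hx; exact absurd hx hxp
        · intro q
          rw [PySem.Set.mem_add]
          constructor
          · rintro (hq | hq)
            · obtain ⟨hq1, hq2⟩ := (hwin q).mp hq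
              have hqp : q ≠ p := fun hqe => hps (hqe ▸ hq1)
              exact ⟨List.mem_append.mpr (Or.inl hq1), by rw [hclx q hqp]; exact hq2⟩
            · subst hq; exact ⟨by simp, by rw [hclp, heq]⟩
          · rintro ⟨hq1, hq2⟩
            by_cases hqp : q = p
            · exact Or.inr hqp
            · rcases List.mem_append.mp hq1 with hq1 | hq1
              · rw [hclx q hqp] at hq2
                exact Or.inl ((hwin q).mpr ⟨hq1, hq2⟩)
              · simp at hq1; exact absurd hq1 hqp
      · rw [if_neg (by simp [heq] : ¬ ((((1 : Int)) == b) = true))]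
        have hlt : (1 : Int) < b := by omega
        refine Or.inr ⟨p, rfl, by simp, ?_, by simpa using hclp.symm, ?_, ?_, ?_⟩
        · intro x hx
          rcases List.mem_append.mp hx with hx | hx
          · exact hle x hx
          · simp at hx; rw [hx]
        · intro x hx
          by_cases hxp : x = p
          · subst hxp; rw [hclp]; omega
          · rcases List.mem_append.mp hx with hx | hx
            · rw [hclx x hxp]; exact hbub x hx
            · simp at hx; exact absurd hx hxp
        · obtain ⟨x, hx, hxb⟩ := hbex
          have hxp : x ≠ p := fun hxe => hps (hxe ▸ hx)
          exact ⟨x, List.mem_append.mpr (Or.inl hx), by rw [hclx x hxp]; exact hxb⟩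
        · intro q
          rw [hwin q]
          constructor
          · rintro ⟨hq1, hq2⟩
            have hqp : q ≠ p := fun hqe => hps (hqe ▸ hq1)
            exact ⟨List.mem_append.mpr (Or.inl hq1), by rw [hclx q hqp]; exact hq2⟩
          · rintro ⟨hq1, hq2⟩
            by_cases hqp : q = p
            · subst hqp
              rw [hclp] at hq2
              omega
            · rcases List.mem_append.mp hq1 with hq1 | hq1
              · rw [hclx q hqp] at hq2
                exact ⟨hq1, hq2⟩
              · simp at hq1; exact absurd hq1 hqp

lemma pvInv_fold (rest : List String) : ∀ (s : List String) st, pvInv s st →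
    (s ++ rest).Pairwise (· ≤ ·) → pvInv (s ++ rest) (rest.foldl pvScanStep st) := by
  induction rest with
  | nil => intro s st h _; simpa using h
  | cons p rest ih =>
    intro s st h hp
    have hle : ∀ x ∈ s, x ≤ p := by
      intro x hx
      exact (List.pairwise_append.mp hp).2.2 x hx p (by simp)
    have h2 := pvInv_step s st p h hle
    have := ih (s ++ [p]) (pvScanStep st p) h2 (by simpa using hp)
    simpa using this

lemma ofList_append_singleton (s : List String) (p : String) :
    PySem.Set.ofList (s ++ [p]) = PySem.Set.add (PySem.Set.ofList s) p := by
  rw [PySem.Set.ofList, PySem.Set.ofList, List.foldl_append]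
  rfl

lemma emit_fold (q : String → Bool) : ∀ (xs s : List String) (w : PySem.Set String),
    (∀ p, p ∈ w ↔ (q p = true ∧ p ∉ s)) →
    (xs.foldl pvEmitStep ((PySem.Set.ofList s).filter q, w)).1
      = (PySem.Set.ofList (s ++ xs)).filter q := by
  intro xs
  induction xs with
  | nil => intro s w _; simp
  | cons p xs ih =>
    intro s w hw
    rw [List.foldl_cons]
    by_cases hpw : p ∈ w
    · obtain ⟨hq, hns⟩ := (hw p).mp hpw
      have hstep : pvEmitStep ((PySem.Set.ofList s).filter q, w) p
          = ((PySem.Set.ofList (s ++ [p])).filter q, PySem.Set.discard w p) := by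
        have hc : PySem.Set.contains w p = true := by
          simpa [PySem.Set.contains] using hpw
        rw [pvEmitStep]
        simp only [hc, if_true]
        rw [ofList_append_singleton]
        simp [PySem.Set.add, PySem.Set.contains, PySem.Set.mem_ofList, hns,
          List.filter_append, hq]
      rw [hstep]
      have hw' : ∀ p', p' ∈ PySem.Set.discard w p ↔ (q p' = true ∧ p' ∉ s ++ [p]) := by
        intro p'
        rw [PySem.Set.discard, List.mem_filter, hw p']
        constructor
        · rintro ⟨⟨hq', hns'⟩, hne⟩
          have hne' : p' ≠ p := by simpa using hne
          exact ⟨hq', by simp [hns', hne']⟩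
        · rintro ⟨hq', hns'⟩
          simp only [List.mem_append, List.mem_singleton, not_or] at hns'
          exact ⟨⟨hq', hns'.1⟩, by simpa using hns'.2⟩
      rw [ih (s ++ [p]) (PySem.Set.discard w p) hw']
      simp
    · have hstep : pvEmitStep ((PySem.Set.ofList s).filter q, w) p
          = ((PySem.Set.ofList s).filter q, w) := by
        rw [pvEmitStep]; simp [PySem.Set.contains, hpw]
      have hfil : (PySem.Set.ofList s).filter q = (PySem.Set.ofList (s ++ [p])).filter q := by
        rw [ofList_append_singleton]
        by_cases hps : p ∈ s
        · simp [PySem.Set.add, PySem.Set.contains, PySem.Set.mem_ofList, hps]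
        · have hnq : q p = false := by
            by_cases hq : q p = true
            · exact absurd ((hw p).mpr ⟨hq, hps⟩) hpw
            · simpa using hq
          simp [PySem.Set.add, PySem.Set.contains, PySem.Set.mem_ofList, hps,
            List.filter_append, hnq]
      have hw' : ∀ p', p' ∈ w ↔ (q p' = true ∧ p' ∉ s ++ [p]) := by
        intro p'
        by_cases hpp : p' = p
        · subst hpp
          simp only [hpw, false_iff, not_and]
          intro _
          simp
        · rw [hw p']
          simp [hpp]
      rw [hstep, hfil, ih (s ++ [p]) w hw']
      simp

lemma step_eq (d : PySem.Dict String Int) (p : String) :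
    (if d.contains p then d.modify p 0 (· + 1) else d.insert p 1) = d.modify p 0 (· + 1) := by
  by_cases h : d.contains p = true
  · simp [h]
  · simp only [Bool.not_eq_true] at h
    simp [h, PySem.Dict.modify, PySem.Dict.getD_of_not_contains (h := h)]

lemma freqA_eq (text : String) (k : Int) :
    frequency_map text k = PySem.Dict.counter (pvPats text k) := by
  rw [frequency_map, PySem.Dict.counter_eq_foldl, pvPats, List.foldl_map]
  congr 1
  funext d i
  exact step_eq d _

-- B's result, characterised: the first-occurrence dedup filtered by "count = best".
lemma altB_eq (text : String) (k : Int) (m : Int)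
    (hmem : ∃ x ∈ pvPats text k, ((pvPats text k).count x : Int) = m)
    (hmax : ∀ x ∈ pvPats text k, ((pvPats text k).count x : Int) ≤ m) :
    frequent_kmers_alt text k
      = (PySem.Set.ofList (pvPats text k)).filter
          (fun p => ((pvPats text k).count p : Int) == m) := by
  unfold frequent_kmers_alt
  rw [show ((PySem.List.pyRange 0 ((text.toList.length : Int) - k + 1) 1).map
      (fun i => PySem.Str.slice text (some i) (some (i + k)))) = pvPats text k from rfl]
  have hperm : ((pvPats text k).mergeSort pvLe).Perm (pvPats text k) :=
    List.mergeSort_perm _ _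
  have hpair : ((pvPats text k).mergeSort pvLe).Pairwise (· ≤ ·) := by
    have hp := List.pairwise_mergeSort' (· ≤ · : String → String → Prop) (pvPats text k)
    have hfe : (fun x1 x2 : String => decide (x1 ≤ x2)) = pvLe := by
      funext a b
      rw [pvLe]
    rw [hfe] at hp
    exact hp
  have hinv0 : pvInv [] ((0 : Int), (PySem.Set.empty : PySem.Set String), (0 : Int),
      (none : Option String)) := Or.inl ⟨rfl, rfl⟩
  have hinv := pvInv_fold ((pvPats text k).mergeSort pvLe) [] _ hinv0
    (by simpa using hpair)
  simp only [List.nil_append] at hinv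
  cases hinv with
  | inl h =>
    obtain ⟨x, hx, _⟩ := hmem
    have : pvPats text k = [] := (h.1 ▸ hperm).nil_eq.symm
    rw [this] at hx
    simp at hx
  | inr h =>
    obtain ⟨last, _, _, _, _, hub, hex, hwin⟩ := h
    set st := ((pvPats text k).mergeSort pvLe).foldl pvScanStep
      ((0 : Int), (PySem.Set.empty : PySem.Set String), (0 : Int), (none : Option String)) with hst
    -- st.1 = m
    obtain ⟨x0, hx0, hx0b⟩ := hex
    have hx0p : x0 ∈ pvPats text k := hperm.mem_iff.mp hx0
    have hcnt : ∀ y, ((pvPats text k).mergeSort pvLe).count y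
        = (pvPats text k).count y := fun y => hperm.count_eq y
    obtain ⟨x1, hx1, hx1m⟩ := hmem
    have hbm : st.1 = m := by
      have h1 : st.1 ≤ m := by rw [hcnt] at hx0b; rw [← hx0b]; exact hmax x0 hx0p
      have h2 : m ≤ st.1 := by
        have := hub x1 (hperm.mem_iff.mpr hx1)
        rw [hcnt] at this
        omega
      omega
    have hm1 : (1 : Int) ≤ m := by
      have : 0 < (pvPats text k).count x1 := List.count_pos_iff.mpr hx1
      omega
    have hq : ∀ p, p ∈ st.2.1 ↔ ((((pvPats text k).count p : Int) == m) = true ∧ p ∉ ([] : List String)) := by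
      intro p
      rw [hwin p]
      simp only [List.not_mem_nil, not_false_iff, and_true, beq_iff_eq]
      constructor
      · rintro ⟨hps, hpc⟩
        rw [hcnt] at hpc
        rw [← hbm]; exact hpc
      · intro hpc
        rw [← hbm] at hpc
        have hppats : p ∈ pvPats text k := by
          apply List.count_pos_iff.mp
          rw [hbm] at hpc
          omega
        exact ⟨hperm.mem_iff.mpr hppats, by rw [hcnt]; exact hpc⟩
    have := emit_fold (fun p => ((pvPats text k).count p : Int) == m) (pvPats text k) [] st.2.1 hq
    simpa using this

lemma valuesA (text : String) (k : Int) :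
    (PySem.Dict.counter (pvPats text k)).values
      = (PySem.Set.ofList (pvPats text k)).map (fun p => ((pvPats text k).count p : Int)) := by
  simp [PySem.Dict.values, PySem.Dict.items_counter]

-- ===== VERDICT (by name: the statement is the Claim_ definition above) =====
theorem frequent_kmers_spec : Claim_equal_frequent_kmers := by
  intro text k _ _
  unfold Spec_frequent_kmers frequent_kmers
  rw [freqA_eq]
  show (match PySem.List.max? (PySem.Dict.counter (pvPats text k)).values (fun v => v) with
    | none => ([] : List String)
    | some m => (PySem.Dict.counter (pvPats text k)).keys.foldl
        (fun kmers kmer => if (PySem.Dict.counter (pvPats text k)).getD kmer 0 == m then kmers ++ [kmer] else kmers) [])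
    = frequent_kmers_alt text k
  cases hm : PySem.List.max? (PySem.Dict.counter (pvPats text k)).values (fun v => v) with
  | none =>
    -- empty frequency map: pats = [], B returns []
    rw [PySem.List.max?_eq_none_iff, valuesA] at hm
    have hpats : pvPats text k = [] := by
      cases hp : pvPats text k with
      | nil => rfl
      | cons a t =>
        rw [hp] at hm
        have : a ∈ PySem.Set.ofList (a :: t) := by
          rw [PySem.Set.mem_ofList]; simp
        cases hq : PySem.Set.ofList (a :: t) with
        | nil => rw [hq] at this; simp at this
        | cons b u => rw [hq] at hm; simp at hm
    show _ = frequent_kmers_alt text k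
    unfold frequent_kmers_alt
    rw [show ((PySem.List.pyRange 0 ((text.toList.length : Int) - k + 1) 1).map
      (fun i => PySem.Str.slice text (some i) (some (i + k)))) = pvPats text k from rfl, hpats]
    rfl
  | some m =>
    have hmmem := PySem.List.max?_mem hm
    rw [valuesA] at hmmem
    simp only [List.mem_map, PySem.Set.mem_ofList] at hmmem
    obtain ⟨x, hx, hxm⟩ := hmmem
    have hmax : ∀ y ∈ pvPats text k, ((pvPats text k).count y : Int) ≤ m := by
      intro y hy
      apply PySem.List.max?_isMax hm
      rw [valuesA]
      simp only [List.mem_map, PySem.Set.mem_ofList]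
      exact ⟨y, hy, rfl⟩
    rw [altB_eq text k m ⟨x, hx, hxm⟩ hmax]
    show (PySem.Dict.counter (pvPats text k)).keys.foldl
        (fun kmers kmer => if (PySem.Dict.counter (pvPats text k)).getD kmer 0 == m then kmers ++ [kmer] else kmers) [] = _
    rw [PySem.List.foldl_append_if_eq_filter, PySem.Dict.keys_counter]
    simp only [List.nil_append]
    apply List.filter_congr
    intro y _
    simp [PySem.Dict.getD_counter]
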